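-- pv_equiv track=rewrite | github.com/julio03-student/Project_AyD-2023 | testJulian/index.py | generar_matriz_estado_estado_F
-- ===== SOURCE A (Python) =====
-- def contador_a_respecto_b(filaA, filaB, lista):
--     contador = 0
--     for i in range(len(lista) - 1):
--         if lista[i] == filaA and lista[i + 1] == filaB:
--             contador += 1
--     return contador
--
-- def generar_matriz_estado_estado_F(estados, transiciones):
--     lista_coincidencias = []
--     for fila in range(len(estados)):
--         fila_coincidencias = []
--         fila_coincidencias.append(estados[fila])
--         for filaS in range(len(estados)):
--             fila_coincidencias.append(
--                 contador_a_respecto_b(estados[fila], estados[filaS], transiciones)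
--             )
--         lista_coincidencias.append(fila_coincidencias)
--     return lista_coincidencias
-- ===== SOURCE B (Python) =====
-- def generar_matriz_estado_estado_F(estados, transiciones):
--     pares = {}
--     for par in zip(transiciones, transiciones[1:]):
--         pares[par] = pares.get(par, 0) + 1
--     return [[a] + [pares.get((a, b), 0) for b in estados] for a in estados]
-- ===== Notes on version B (the rewrite author's own statement) =====
-- stated objective: faster
-- what changed: Instead of rescanning the whole transition list for each of the S^2 state pairs, B counts adjacent pairs once into a dictionary and builds each matrix cell by a lookup.
import Mathlib
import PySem

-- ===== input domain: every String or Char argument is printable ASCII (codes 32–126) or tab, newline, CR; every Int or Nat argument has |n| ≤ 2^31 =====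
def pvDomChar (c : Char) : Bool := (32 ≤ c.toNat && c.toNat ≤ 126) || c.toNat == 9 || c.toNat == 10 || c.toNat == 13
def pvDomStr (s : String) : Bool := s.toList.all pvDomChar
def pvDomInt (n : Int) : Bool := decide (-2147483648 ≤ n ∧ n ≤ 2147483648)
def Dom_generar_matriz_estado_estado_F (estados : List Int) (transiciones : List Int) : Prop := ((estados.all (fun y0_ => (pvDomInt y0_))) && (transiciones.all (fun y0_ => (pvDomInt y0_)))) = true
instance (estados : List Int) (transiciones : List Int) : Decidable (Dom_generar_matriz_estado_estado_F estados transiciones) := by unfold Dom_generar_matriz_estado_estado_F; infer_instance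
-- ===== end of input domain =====

-- B counts adjacent transition pairs once into a dict and builds each matrix cell by lookup,
-- replacing A's full rescan of the transition list per state pair.


-- ===== PORT A =====
-- helper contador_a_respecto_b: full scan of 'lista' for one (filaA, filaB) pair.
-- (every index the range produces is in bounds, so pyGetD with default 0 is exact here)
def contador_a_respecto_b (filaA : Int) (filaB : Int) (lista : List Int) : Int :=
  (PySem.List.pyRange 0 ((lista.length : Int) - 1) 1).foldl
    (fun contador i =>
      if PySem.List.pyGetD lista i 0 = filaA ∧ PySem.List.pyGetD lista (i + 1) 0 = filaB then
        contador + 1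
      else contador) 0

def generar_matriz_estado_estado_F (estados : List Int) (transiciones : List Int) : List (List Int) :=
  (PySem.List.pyRange 0 (estados.length : Int) 1).foldl
    (fun lista_coincidencias fila =>
      lista_coincidencias ++
        [(PySem.List.pyRange 0 (estados.length : Int) 1).foldl
          (fun fila_coincidencias filaS =>
            fila_coincidencias ++
              [contador_a_respecto_b (PySem.List.pyGetD estados fila 0)
                (PySem.List.pyGetD estados filaS 0) transiciones])
          ([] ++ [PySem.List.pyGetD estados fila 0])]) []

-- ===== PORT B =====
def generar_matriz_estado_estado_F_alt (estados : List Int) (transiciones : List Int) : List (List Int) :=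
  let pares : PySem.Dict (Int × Int) Int :=
    (transiciones.zip (PySem.List.slice transiciones (some 1) none)).foldl
      (fun d par => d.insert par (d.getD par 0 + 1)) PySem.Dict.empty
  estados.map (fun a => [a] ++ estados.map (fun b => pares.getD (a, b) 0))

-- ===== PRECONDITION & SPEC =====
def Spec_generar_matriz_estado_estado_F (estados : List Int) (transiciones : List Int) (out : List (List Int)) : Prop := out = generar_matriz_estado_estado_F_alt estados transiciones
instance (estados : List Int) (transiciones : List Int) (out : List (List Int)) : Decidable (Spec_generar_matriz_estado_estado_F estados transiciones out) := by unfold Spec_generar_matriz_estado_estado_F; infer_instance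

-- ===== CLAIM (what is proved, stated in full; the proofs are below) =====
def Claim_equal_generar_matriz_estado_estado_F : Prop := ∀ (estados : List Int) (transiciones : List Int), Dom_generar_matriz_estado_estado_F estados transiciones → Spec_generar_matriz_estado_estado_F estados transiciones (generar_matriz_estado_estado_F estados transiciones)

-- ===== LEMMAS AND PROOFS =====

-- A's indexed scan over range(len-1) counts exactly the occurrences of the pair in zip(l, l[1:]).
theorem auxCount (l : List Int) (a b : Int) :
    (List.range l.tail.length).countP
      (fun k => decide (l.getD k 0 = a ∧ l.getD (k+1) 0 = b)) =
    (l.zip l.tail).count (a, b) := by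
  induction l with
  | nil => simp
  | cons x t ih =>
    cases t with
    | nil => simp
    | cons y t' =>
      simp only [List.tail_cons, List.getD_cons_succ] at *
      rw [List.length_cons, List.range_succ_eq_map, List.countP_cons, List.countP_map]
      simp only [Function.comp_def, List.getD_cons_succ, List.getD_cons_zero]
      rw [ih, List.zip_cons_cons, List.count_cons]
      simp only [beq_iff_eq, Prod.mk.injEq]
      by_cases h1 : x = a <;> by_cases h2 : y = b <;> simp [h1, h2]

theorem contador_eq_zip_count (a b : Int) (l : List Int) :
    contador_a_respecto_b a b l = ((l.zip l.tail).count (a, b) : Int) := by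
  unfold contador_a_respecto_b
  rw [PySem.List.foldl_ite_add_one]
  cases l with
  | nil => simp [PySem.List.pyRange]
  | cons x t =>
    have h : (((x :: t).length : Int) - 1) = ((t.length : Nat) : Int) := by simp
    rw [h, PySem.List.pyRange_zero_natCast, List.countP_map]
    have hp : ∀ k : Nat,
        (decide (PySem.List.pyGetD (x :: t) (k : Int) 0 = a ∧
                 PySem.List.pyGetD (x :: t) ((k : Int) + 1) 0 = b)) =
        (decide ((x :: t).getD k 0 = a ∧ (x :: t).getD (k+1) 0 = b)) := by
      intro k
      rw [show ((k : Int) + 1) = ((k + 1 : Nat) : Int) by push_cast; ring,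
        PySem.List.pyGetD_natCast, PySem.List.pyGetD_natCast]
    simp only [Function.comp_def, hp]
    rw [show t.length = (x :: t).tail.length by simp, auxCount]
    ring

-- a map over range(len(xs)) of a function of xs[j] is a map over xs
theorem mapRange {β : Type} (xs : List Int) (F : Int → β) :
    (PySem.List.pyRange 0 (xs.length : Int) 1).map (fun j => F (PySem.List.pyGetD xs j 0)) = xs.map F := by
  rw [show (fun j => F (PySem.List.pyGetD xs j 0)) = F ∘ (fun j => PySem.List.pyGetD xs j 0) from rfl,
    ← List.map_map, PySem.List.map_pyGetD_pyRange_zero']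

theorem gen_eq :
    ∀ (estados transiciones : List Int),
      generar_matriz_estado_estado_F estados transiciones =
        generar_matriz_estado_estado_F_alt estados transiciones := by
  intro es t
  unfold generar_matriz_estado_estado_F generar_matriz_estado_estado_F_alt
  rw [PySem.List.foldl_append_singleton_eq_map, List.nil_append]
  simp only [PySem.List.foldl_append_singleton_eq_map, List.nil_append]
  have hrow : ∀ fila : Int,
      [PySem.List.pyGetD es fila 0] ++
        (PySem.List.pyRange 0 (es.length : Int) 1).map
          (fun filaS => contador_a_respecto_b (PySem.List.pyGetD es fila 0)
            (PySem.List.pyGetD es filaS 0) t) =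
      (fun a => [a] ++ es.map (fun b => contador_a_respecto_b a b t)) (PySem.List.pyGetD es fila 0) := by
    intro fila
    rw [mapRange es (fun b => contador_a_respecto_b (PySem.List.pyGetD es fila 0) b t)]
  simp only [hrow]
  rw [mapRange es (fun a => [a] ++ es.map (fun b => contador_a_respecto_b a b t))]
  simp only [PySem.List.slice_from_one]
  apply List.map_congr_left
  intro a _
  congr 1
  apply List.map_congr_left
  intro b _
  rw [PySem.Dict.getD_foldl_insert_add_one, PySem.Dict.getD_empty, contador_eq_zip_count]
  ring

-- ===== VERDICT (by name: the statement is the Claim_ definition above) =====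
theorem generar_matriz_estado_estado_F_spec : Claim_equal_generar_matriz_estado_estado_F := by
  intro estados transiciones _
  exact gen_eq estados transiciones
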